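-- pv_equiv track=rewrite | github.com/sgilz/Apolo-proof | lenguajes_de_programacion/3.py | odd_fibonacci
-- ===== SOURCE A (Python) =====
-- def odd_fibonacci(m):
--     l = []
--     if m <=0:
--         pass
--     else:
--         current = 0
--         nex = 1
--         l.append(1)
--         while len(l)<m:
--             val = current + nex
--             if val%2 != 0:
--                 l.append(val)
--             current = nex
--             nex = val
--     return l
-- ===== SOURCE B (Python) =====
-- def odd_fibonacci(m):
--     l = []
--     x, y = 1, 1
--     while len(l) < m:
--         l.append(x)
--         if len(l) < m:
--             l.append(y)
--         x, y = x + 2*y, 2*x + 3*y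
--     return l
-- ===== Notes on version B (the rewrite author's own statement) =====
-- stated objective: alternative
-- what changed: B generates odd Fibonacci numbers directly, two per step, via the odd-subsequence recurrence (x,y)->(x+2y,2x+3y), never computing even terms or testing parity.
import Mathlib
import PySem

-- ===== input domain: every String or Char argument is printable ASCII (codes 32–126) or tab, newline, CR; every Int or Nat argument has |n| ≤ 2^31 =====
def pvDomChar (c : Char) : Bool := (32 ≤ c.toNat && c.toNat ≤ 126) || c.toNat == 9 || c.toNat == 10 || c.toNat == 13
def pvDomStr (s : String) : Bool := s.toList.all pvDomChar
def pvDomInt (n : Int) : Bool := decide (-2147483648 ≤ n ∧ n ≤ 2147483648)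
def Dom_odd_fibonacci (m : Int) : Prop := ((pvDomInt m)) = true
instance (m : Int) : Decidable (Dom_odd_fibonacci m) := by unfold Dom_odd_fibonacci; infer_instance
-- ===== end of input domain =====

-- B generates the odd Fibonacci numbers directly, two per loop step, via the
-- recurrence (x,y) -> (x+2y, 2x+3y) on consecutive odd Fibonacci numbers:
-- no even terms are ever computed and no parity test is made.

-- ===== PORT A =====
-- A's while loop, ported with a fuel bound large enough for every admitted m
-- (each 3 iterations append 2 elements, so 3*m+3 iterations always suffice).
def pvLoopA (fuel : Nat) (m current nex : Int) (l : List Int) : List Int :=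
  match fuel with
  | 0 => l
  | Nat.succ f =>
    if (l.length : Int) < m then
      let val := current + nex
      pvLoopA f m nex val (if PySem.Int.mod val 2 ≠ 0 then l ++ [val] else l)
    else l

def odd_fibonacci (m : Int) : List Int :=
  if m ≤ 0 then [] else pvLoopA (3 * m.toNat + 3) m 0 1 [1]

-- ===== PORT B =====
-- B's while loop: append x, re-check the guard, maybe append y, advance the pair.
def pvLoopB (m x y : Int) (l : List Int) : List Int :=
  if (l.length : Int) < m then
    pvLoopB m (x + 2*y) (2*x + 3*y)
      (if (l.length : Int) + 1 < m then l ++ [x, y] else l ++ [x])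
  else l
termination_by (m - l.length).toNat
decreasing_by split_ifs <;> simp <;> omega

def odd_fibonacci_alt (m : Int) : List Int := pvLoopB m 1 1 []

-- ===== PRECONDITION & SPEC =====
def Spec_odd_fibonacci (m : Int) (out : List Int) : Prop := out = odd_fibonacci_alt m
instance (m : Int) (out : List Int) : Decidable (Spec_odd_fibonacci m out) := by unfold Spec_odd_fibonacci; infer_instance

-- ===== CLAIM (what is proved, stated in full; the proofs are below) =====
def Claim_equal_odd_fibonacci : Prop := ∀ (m : Int), Dom_odd_fibonacci m → Spec_odd_fibonacci m (odd_fibonacci m)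

-- ===== LEMMAS AND PROOFS =====

lemma pvLoopB_stop (m x y : Int) (l : List Int) (h : ¬ (l.length : Int) < m) :
    pvLoopB m x y l = l := by
  rw [pvLoopB]; simp [h]

-- Main invariant: from an odd-odd state (c,n), A's loop agrees with B's loop
-- started at the pair (c+2n, 2c+3n) (the next two odd Fibonacci numbers).
lemma loop_eq : ∀ (k fuel : Nat) (m c n : Int) (l : List Int),
    (m - l.length).toNat ≤ k → 3 * k ≤ fuel →
    c % 2 = 1 → n % 2 = 1 →
    pvLoopA fuel m c n l = pvLoopB m (c + 2*n) (2*c + 3*n) l := by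
  intro k
  induction k with
  | zero =>
    intro fuel m c n l hk hf hc hn
    have hstop : ¬ (l.length : Int) < m := by omega
    rw [pvLoopB_stop _ _ _ _ hstop]
    cases fuel with
    | zero => rfl
    | succ f => rw [pvLoopA]; simp [hstop]
  | succ k ih =>
    intro fuel m c n l hk hf hc hn
    by_cases h : (l.length : Int) < m
    · -- fuel ≥ 3
      obtain ⟨f, rfl⟩ : ∃ f, fuel = f + 3 := ⟨fuel - 3, by omega⟩
      have hm1 : PySem.Int.mod (c + n) 2 = 0 := by
        rw [PySem.Int.mod_eq_emod_of_pos (by norm_num)]; omega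
      have hm2 : PySem.Int.mod (n + (c + n)) 2 = 1 := by
        rw [PySem.Int.mod_eq_emod_of_pos (by norm_num)]; omega
      have hm3 : PySem.Int.mod ((c + n) + (n + (c + n))) 2 = 1 := by
        rw [PySem.Int.mod_eq_emod_of_pos (by norm_num)]; omega
      -- unfold three iterations of A
      show pvLoopA (f + 1 + 1 + 1) m c n l = _
      rw [pvLoopA]; simp only [hm1]
      rw [if_pos h, if_neg (by decide)]
      rw [pvLoopA]
      rw [if_pos h]
      simp only [hm2]
      rw [if_pos (by decide : ¬ (1:Int) = 0)]
      rw [pvLoopA]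
      by_cases h2 : (l.length : Int) + 1 < m
      · rw [if_pos (by simp; omega : ((l ++ [n + (c + n)]).length : Int) < m)]
        simp only [hm3]
        rw [if_pos (by decide : ¬ (1:Int) = 0)]
        have hrec := ih f m (n + (c + n)) ((c + n) + (n + (c + n)))
            ((l ++ [n + (c + n)]) ++ [(c + n) + (n + (c + n))])
            (by simp; omega) (by omega) (by omega) (by omega)
        rw [hrec]
        conv_rhs => rw [pvLoopB]
        rw [if_pos h, if_pos h2]
        have e1 : n + (c + n) + 2 * (c + n + (n + (c + n))) =
            c + 2 * n + 2 * (2 * c + 3 * n) := by ring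
        have e2 : 2 * (n + (c + n)) + 3 * (c + n + (n + (c + n))) =
            2 * (c + 2 * n) + 3 * (2 * c + 3 * n) := by ring
        have e3 : l ++ [c + 2 * n, 2 * c + 3 * n] =
            (l ++ [n + (c + n)]) ++ [c + n + (n + (c + n))] := by
          simp; constructor <;> ring
        rw [e1, e2, e3]
      · rw [if_neg (by simp; omega : ¬ ((l ++ [n + (c + n)]).length : Int) < m)]
        rw [pvLoopB]
        rw [if_pos h, if_neg h2]
        rw [pvLoopB_stop]
        · congr 2; ring
        · simp; omega
    · rw [pvLoopB_stop _ _ _ _ h]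
      obtain ⟨f, rfl⟩ : ∃ f, fuel = f + 1 := ⟨fuel - 1, by omega⟩
      rw [pvLoopA]; simp [h]

-- ===== VERDICT (by name: the statement is the Claim_ definition above) =====
theorem odd_fibonacci_spec : Claim_equal_odd_fibonacci := by
  intro m _
  show odd_fibonacci m = odd_fibonacci_alt m
  unfold odd_fibonacci odd_fibonacci_alt
  by_cases hm : m ≤ 0
  · rw [if_pos hm, pvLoopB_stop]; simp; omega
  · rw [if_neg hm]
    by_cases h1 : m = 1
    · subst h1
      rw [pvLoopB]; simp
      rw [pvLoopB_stop _ _ _ _ (by simp)]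
      show pvLoopA (0 + 3) 1 0 1 [1] = [1]
      rw [pvLoopA]; simp
    · -- m ≥ 2
      have hm2 : 2 ≤ m := by omega
      obtain ⟨f, hfe⟩ : ∃ f, 3 * m.toNat + 3 = f + 1 := ⟨3 * m.toNat + 2, rfl⟩
      rw [hfe, pvLoopA]
      rw [if_pos (by simp; omega : (([1]:List Int).length : Int) < m)]
      have hmod : PySem.Int.mod (0 + 1) 2 = 1 := by
        rw [PySem.Int.mod_eq_emod_of_pos (by norm_num)]; decide
      simp only [hmod]
      rw [if_pos (by decide : ¬ (1:Int) = 0)]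
      have key := loop_eq (m - 2).toNat f m 1 1 [1, 1]
        (by simp only [List.length_cons, List.length_nil]; omega) (by omega)
        (by decide) (by decide)
      norm_num at key
      show pvLoopA f m 1 1 [1, 1] = pvLoopB m 1 1 []
      rw [key]
      conv_rhs => rw [pvLoopB]
      rw [if_pos (by simp; omega : (([]:List Int).length : Int) < m),
          if_pos (by simp; omega : (([]:List Int).length : Int) + 1 < m)]
      norm_num
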